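-- pv_equiv track=rewrite | github.com/MrBrantCode/unitest_baseline | mut_generate/mist_train_taco/taco_2005/solution.py | min_deletions_for_nonzero_and
-- ===== SOURCE A (Python) =====
-- def min_deletions_for_nonzero_and(l, r):
--     def fun(n):
--         n += 1
--         i = 2
--         arr = [0 for _ in range(32)]
--         j = 32
--         while n >= i // 2:
--             j -= 1
--             x = n // i * (i // 2)
--             if n % i > i // 2:
--                 x += n % i - i // 2
--             arr[j] = x
--             i = i * 2
--         return arr
--
--     a = fun(r)
--     b = fun(l - 1)
--     for i in range(32):
--         a[i] -= b[i]
--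
--     return r + 1 - l - max(a)
-- ===== SOURCE B (Python) =====
-- def min_deletions_for_nonzero_and(l, r):
--     def cnt(n, k):
--         # how many m in [0, n) have bit k set, by recursion on the binary
--         # structure: pair m = 2q, 2q+1 (bit k of m = bit k-1 of q), with the
--         # single unpaired element n-1 handled separately when n is odd.
--         if n <= 0:
--             return 0
--         if k == 0:
--             return n // 2
--         unpaired = (n // 2) // 2 ** (k - 1) % 2 if n % 2 else 0
--         return 2 * cnt(n // 2, k - 1) + unpaired
--     best = 0
--     for k in range(32):
--         best = max(best, cnt(r + 1, k) - cnt(l, k))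
--     return r + 1 - l - best
-- ===== Notes on version B (the rewrite author's own statement) =====
-- stated objective: alternative
-- what changed: Replaces A's closed-form per-block prefix counting into two 32-entry arrays (doubling while-loop, element-wise subtraction, max()) with a recursive binary-structure bit-DP cnt(n,k) = 2*cnt(n//2,k-1) + unpaired-element bit, combined by a running-max accumulator loop with no arrays.
import Mathlib
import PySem

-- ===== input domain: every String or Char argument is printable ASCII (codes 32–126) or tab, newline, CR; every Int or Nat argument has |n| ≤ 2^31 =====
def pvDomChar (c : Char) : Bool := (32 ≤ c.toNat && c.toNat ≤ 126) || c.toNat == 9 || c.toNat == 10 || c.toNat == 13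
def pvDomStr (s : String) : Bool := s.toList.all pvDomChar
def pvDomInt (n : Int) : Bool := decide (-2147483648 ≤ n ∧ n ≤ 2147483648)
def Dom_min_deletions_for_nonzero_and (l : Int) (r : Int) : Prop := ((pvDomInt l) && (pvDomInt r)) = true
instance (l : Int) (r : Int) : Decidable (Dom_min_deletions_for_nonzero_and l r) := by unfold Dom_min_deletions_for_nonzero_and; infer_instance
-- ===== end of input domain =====

-- B replaces A's closed-form per-block prefix arrays by a recursive binary-structure
-- bit-DP (cnt(n,k) = 2*cnt(n//2,k-1) + unpaired bit) and a running-max accumulator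
-- loop with no arrays (objective: alternative).

-- ===== PORT A =====
-- fuel: a totality guard only — on Dom the while loop runs at most 32 times (n+1 < 2^32)
def pvFunLoopA (n : Int) (i : Int) (arr : List Int) (j : Int) : Nat → List Int
  | 0 => arr
  | fuel+1 =>
    if PySem.Int.floordiv i 2 ≤ n then
      let j1 := j - 1
      let x0 := PySem.Int.floordiv n i * PySem.Int.floordiv i 2
      let x := if PySem.Int.floordiv i 2 < PySem.Int.mod n i then
                 x0 + (PySem.Int.mod n i - PySem.Int.floordiv i 2) else x0
      pvFunLoopA n (i * 2) (PySem.List.pySetD arr j1 x) j1 fuel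
    else arr

def pvFunA (n0 : Int) : List Int :=
  pvFunLoopA (n0 + 1) 2 (List.replicate 32 0) 32 33

def min_deletions_for_nonzero_and (l : Int) (r : Int) : Int :=
  let a := pvFunA r
  let b := pvFunA (l - 1)
  let a2 := (PySem.List.pyRange 0 32).foldl
    (fun acc i => PySem.List.pySetD acc i
      (PySem.List.pyGetD acc i 0 - PySem.List.pyGetD b i 0)) a
  -- max(a) on a nonempty list; .getD 0 is a totality guard only
  r + 1 - l - ((PySem.List.max? a2 (fun x => x)).getD 0)

-- ===== PORT B =====
-- cnt(n, k): how many m in [0, n) have bit k set, by recursion on the binary structure.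
-- (k-1).toNat in the exponent is exact: in every call k starts in 0..31 and the k = 0
-- branch stops before k goes negative. Termination: n strictly shrinks (n//2 < n for n > 0).
def pvCnt (n : Int) (k : Int) : Int :=
  if hn : n ≤ 0 then 0
  else if k = 0 then PySem.Int.floordiv n 2
  else
    let unpaired := if PySem.Int.mod n 2 ≠ 0 then
        PySem.Int.mod (PySem.Int.floordiv (PySem.Int.floordiv n 2) ((2:Int) ^ (k - 1).toNat)) 2
      else 0
    2 * pvCnt (PySem.Int.floordiv n 2) (k - 1) + unpaired
termination_by n.toNat
decreasing_by
  rw [PySem.Int.floordiv_eq_ediv_of_pos (show (0:Int) < 2 by norm_num)]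
  omega

def min_deletions_for_nonzero_and_alt (l : Int) (r : Int) : Int :=
  let best := (PySem.List.pyRange 0 32).foldl
    (fun best k => max best (pvCnt (r + 1) k - pvCnt l k)) 0
  r + 1 - l - best

-- ===== PRECONDITION & SPEC =====
def Spec_min_deletions_for_nonzero_and (l : Int) (r : Int) (out : Int) : Prop := out = min_deletions_for_nonzero_and_alt l r
instance (l : Int) (r : Int) (out : Int) : Decidable (Spec_min_deletions_for_nonzero_and l r out) := by unfold Spec_min_deletions_for_nonzero_and; infer_instance

-- ===== CLAIM (what is proved, stated in full; the proofs are below) =====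
def Claim_equal_min_deletions_for_nonzero_and : Prop := ∀ (l : Int) (r : Int), Dom_min_deletions_for_nonzero_and l r → Spec_min_deletions_for_nonzero_and l r (min_deletions_for_nonzero_and l r)

-- ===== LEMMAS AND PROOFS =====

-- closed-form count of integers in [0, n-1] with bit k set (0 for n ≤ 0):
-- the common characterisation both ports are proved against
def pvC (n : Int) (k : Nat) : Int :=
  if n ≤ 0 then 0
  else PySem.Int.floordiv n (2^(k+1)) * 2^k + max 0 (PySem.Int.mod n (2^(k+1)) - 2^k)

lemma pvC_formula (n : Int) (k : Nat) (h : 0 ≤ n) :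
    pvC n k = n / 2^(k+1) * 2^k + max 0 (n % 2^(k+1) - 2^k) := by
  unfold pvC
  have hp : (0:Int) < 2^(k+1) := by positivity
  have hk : (0:Int) < 2^k := by positivity
  by_cases h0 : n ≤ 0
  · have : n = 0 := by omega
    subst this
    rw [if_pos (le_refl (0:Int)), Int.zero_ediv, Int.zero_emod, zero_mul, zero_add, zero_sub,
        max_eq_left (neg_nonpos.mpr (by positivity : (0:Int) ≤ 2^k))]
  · rw [if_neg h0, PySem.Int.floordiv_eq_ediv_of_pos hp, PySem.Int.mod_eq_emod_of_pos hp]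

lemma pvC_nonneg (n : Int) (k : Nat) : 0 ≤ pvC n k := by
  unfold pvC
  by_cases h : n ≤ 0
  · simp [h]
  · rw [if_neg h]
    have hp : (0:Int) < 2^(k+1) := by positivity
    rw [PySem.Int.floordiv_eq_ediv_of_pos hp, PySem.Int.mod_eq_emod_of_pos hp]
    have h1 : 0 ≤ n / 2^(k+1) := Int.ediv_nonneg (by omega) (by positivity)
    have h2 : (0:Int) ≤ 2^k := by positivity
    nlinarith [le_max_left (0:Int) (n % 2^(k+1) - 2^k)]

lemma pvC_zero_of_lt {n : Int} {k : Nat} (h0 : 0 < n) (h : n ≤ 2^k) : pvC n k = 0 := by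
  unfold pvC
  have hnle : ¬ (n ≤ 0) := by omega
  have hp : (0:Int) < 2^(k+1) := by positivity
  have hk : (2:Int)^k < 2^(k+1) := by
    rw [pow_succ]; nlinarith [pow_pos (show (0:Int) < 2 by norm_num) k]
  rw [if_neg hnle, PySem.Int.floordiv_eq_ediv_of_pos hp, PySem.Int.mod_eq_emod_of_pos hp]
  have hdiv : n / 2^(k+1) = 0 := Int.ediv_eq_zero_of_lt (by omega) (by omega)
  have hmod : n % 2^(k+1) = n := Int.emod_eq_of_lt (by omega) (by omega)
  rw [hdiv, hmod, max_eq_left (by omega)]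
  ring

-- the recursive bit-DP computes pvC
lemma pvCnt_eq (k : Nat) : ∀ n : Int, pvCnt n (k : Int) = pvC n k := by
  induction k with
  | zero =>
    intro n
    rw [pvCnt]
    by_cases h : n ≤ 0
    · unfold pvC; simp [h]
    · rw [dif_neg h, if_pos (show ((0:Nat):Int) = 0 by norm_num)]
      unfold pvC
      rw [if_neg h]
      have hm : PySem.Int.mod n ((2:Int)^(0+1)) = n % 2 := by
        rw [show ((2:Int)^(0+1)) = 2 by norm_num]
        exact PySem.Int.mod_eq_emod_of_pos (by norm_num)
      have hd : PySem.Int.floordiv n ((2:Int)^(0+1)) = PySem.Int.floordiv n 2 := by norm_num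
      rw [hm, hd, pow_zero, mul_one, max_eq_left (by omega), add_zero]
  | succ k ih =>
    intro n
    rw [pvCnt]
    by_cases h : n ≤ 0
    · unfold pvC; simp [h]
    · have hk0 : ((k + 1 : Nat) : Int) ≠ 0 := by push_cast; omega
      have hk1 : ((k + 1 : Nat) : Int) - 1 = (k : Int) := by push_cast; ring
      simp only [dif_neg h, if_neg hk0, hk1, Int.toNat_natCast]
      rw [ih]
      -- notation: m = n // 2, b = n % 2, P = 2^k
      have h2 : (0:Int) < 2 := by norm_num
      have hfd : PySem.Int.floordiv n 2 = n / 2 := PySem.Int.floordiv_eq_ediv_of_pos h2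
      have hmd : PySem.Int.mod n 2 = n % 2 := PySem.Int.mod_eq_emod_of_pos h2
      set m := n / 2 with hmdef
      set b := n % 2 with hbdef
      have hP : (0:Int) < 2^k := by positivity
      have hm0 : 0 ≤ m := Int.ediv_nonneg (by omega) (by norm_num)
      have hb01 : 0 ≤ b ∧ b < 2 := ⟨Int.emod_nonneg n (by norm_num), Int.emod_lt_of_pos n h2⟩
      have hn2 : n = 2 * m + b := by rw [hmdef, hbdef]; omega
      -- the inner floordiv/mod of the unpaired bit, in ediv/emod form
      have hfd2 : PySem.Int.floordiv m (2^k) = m / 2^k := PySem.Int.floordiv_eq_ediv_of_pos hP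
      have hmd2 : PySem.Int.mod (m / 2^k) 2 = (m / 2^k) % 2 := PySem.Int.mod_eq_emod_of_pos h2
      rw [hfd, hmd, hfd2, hmd2, pvC_formula n (k+1) (by omega), pvC_formula m k hm0]
      -- decompose m by 2^(k+1)
      set Q := m / 2^(k+1) with hQ
      set R := m % 2^(k+1) with hR
      have hp1 : (0:Int) < 2^(k+1) := by positivity
      have hR0 : 0 ≤ R := Int.emod_nonneg m (by positivity)
      have hR1 : R < 2^(k+1) := Int.emod_lt_of_pos m hp1
      have hmQR : m = 2^(k+1) * Q + R := by
        rw [hQ, hR]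
        exact (Int.mul_ediv_add_emod m (2^(k+1))).symm
      have hpow : (2:Int)^(k+1) = 2 * 2^k := by rw [pow_succ]; ring
      have hpow2 : (2:Int)^(k+1+1) = 4 * 2^k := by rw [pow_succ, hpow]; ring
      rw [hpow] at hmQR hR1
      have hn' : n = (2*R + b) + 2^(k+1+1) * Q := by
        rw [hpow2]
        linear_combination hn2 + 2 * hmQR
      -- (F1) n / 2^(k+2) = Q
      have hF1 : n / 2^(k+1+1) = Q := by
        rw [hn', Int.add_mul_ediv_left _ _ (show (2:Int)^(k+1+1) ≠ 0 by positivity),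
            Int.ediv_eq_zero_of_lt (by omega) (by rw [hpow2]; omega), zero_add]
      -- (F2) n % 2^(k+2) = 2R + b
      have hF2 : n % 2^(k+1+1) = 2*R + b := by
        rw [hn', Int.add_mul_emod_self_left,
            Int.emod_eq_of_lt (by omega) (by rw [hpow2]; omega)]
      -- (F3) (m / 2^k) % 2 = 1 iff 2^k ≤ R  (the unpaired element's bit)
      have hdivm : m / 2^k = R / 2^k + 2 * Q := by
        rw [show m = R + 2^k * (2*Q) from by linear_combination hmQR,
            Int.add_mul_ediv_left _ _ (show (2:Int)^k ≠ 0 by positivity)]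
      have hRd : R / 2^k = if 2^k ≤ R then 1 else 0 := by
        by_cases hc : 2^k ≤ R
        · rw [if_pos hc, show R = (R - 2^k) + 2^k * 1 from by ring,
              Int.add_mul_ediv_left _ _ (show (2:Int)^k ≠ 0 by positivity),
              Int.ediv_eq_zero_of_lt (by omega) (by omega), zero_add]
        · rw [if_neg hc]
          exact Int.ediv_eq_zero_of_lt (by omega) (by omega)
      have hF3 : (m / 2^k) % 2 = if 2^k ≤ R then 1 else 0 := by
        rw [hdivm, Int.add_mul_emod_self_left, hRd]
        split_ifs <;> decide
      rw [hF1, hF2, hF3, hpow]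
      -- remaining: case analysis on the unpaired bit and on b ∈ {0, 1}
      rcases le_or_gt ((2:Int)^k) R with hcase | hcase
      · rw [if_pos hcase, max_eq_right (by omega : (0:Int) ≤ R - 2^k),
            max_eq_right (by omega : (0:Int) ≤ 2*R + b - 2 * 2^k)]
        by_cases hbz : b ≠ 0
        · rw [if_pos hbz, show b = 1 from by omega]; ring
        · rw [if_neg hbz, show b = 0 from by omega]; ring
      · rw [if_neg (by omega : ¬ (2:Int)^k ≤ R),
            max_eq_left (by omega : R - 2^k ≤ (0:Int)),
            max_eq_left (by omega : 2*R + b - 2 * 2^k ≤ (0:Int))]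
        split_ifs <;> ring

-- ===== A-side characterisation (prefix arrays) =====

lemma map_getD_range_eq (arr : List Int) (h : arr.length = 32) :
    (List.range 32).map (fun idx => arr.getD idx 0) = arr := by
  apply List.ext_getElem
  · simp [h]
  · intro i h1 h2
    simp only [List.getElem_map, List.getElem_range]
    rw [List.getD_eq_getElem _ _ (by omega)]

lemma set_map_range (F : Nat → Int) (m : Nat) (v : Int) (hm : m < 32) :
    ((List.range 32).map F).set m v
      = (List.range 32).map (fun idx => if idx = m then v else F idx) := by
  apply List.ext_getElem
  · simp
  · intro i h1 h2
    rw [List.getElem_set]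
    simp only [List.getElem_map, List.getElem_range]
    by_cases hi : i = m
    · subst hi; simp
    · rw [if_neg (fun hh => hi hh.symm), if_neg hi]

lemma loopA_spec : ∀ (fuel t : Nat) (n : Int) (arr : List Int),
    t ≤ 32 → 32 - t < fuel → arr.length = 32 → 0 < n → n < 2^32 →
    (∀ idx : Nat, idx + t ≤ 31 → arr.getD idx 0 = 0) →
    pvFunLoopA n ((2:Int)^(t+1)) arr ((32:Int) - (t:Int)) fuel
      = (List.range 32).map (fun idx => if 32 - t ≤ idx then arr.getD idx 0 else pvC n (31 - idx)) := by
  intro fuel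
  induction fuel with
  | zero => intro t n arr ht hf; omega
  | succ f ih =>
    intro t n arr ht hf hlen hn hbound hzero
    have hfd : PySem.Int.floordiv ((2:Int)^(t+1)) 2 = 2^t := by
      rw [PySem.Int.floordiv_eq_ediv_of_pos (by norm_num), pow_succ]
      exact Int.mul_ediv_cancel _ (by norm_num)
    rw [pvFunLoopA]
    rw [hfd]
    by_cases hge : (2:Int)^t ≤ n
    · rw [if_pos hge]
      have ht31 : t < 32 := by
        by_contra hc
        have : (2:Int)^32 ≤ 2^t := pow_le_pow_right₀ (by norm_num) (by omega)
        omega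
      -- the written value equals pvC n t
      have hxval :
          (if (2:Int)^t < PySem.Int.mod n ((2:Int)^(t+1)) then
              PySem.Int.floordiv n ((2:Int)^(t+1)) * (2:Int)^t
                + (PySem.Int.mod n ((2:Int)^(t+1)) - (2:Int)^t)
            else PySem.Int.floordiv n ((2:Int)^(t+1)) * (2:Int)^t) = pvC n t := by
        unfold pvC
        rw [if_neg (show ¬ n ≤ 0 by omega)]
        by_cases hc : (2:Int)^t < PySem.Int.mod n ((2:Int)^(t+1))
        · rw [if_pos hc, max_eq_right (by omega)]
        · rw [if_neg hc, max_eq_left (by omega)]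
          ring
      have hj : ((32:Int) - (t:Int)) - 1 = ((31 - t : Nat) : Int) := by
        omega
      have harr' : PySem.List.pySetD arr (((32:Int) - (t:Int)) - 1) (pvC n t)
          = arr.set (31 - t) (pvC n t) := by
        rw [hj, PySem.List.pySetD_natCast]
      show pvFunLoopA n ((2:Int)^(t+1) * 2)
          (PySem.List.pySetD arr ((32:Int) - (t:Int) - 1)
            (if (2:Int)^t < PySem.Int.mod n ((2:Int)^(t+1)) then
                PySem.Int.floordiv n ((2:Int)^(t+1)) * (2:Int)^t
                  + (PySem.Int.mod n ((2:Int)^(t+1)) - (2:Int)^t)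
              else PySem.Int.floordiv n ((2:Int)^(t+1)) * (2:Int)^t))
          ((32:Int) - (t:Int) - 1) f
        = List.map (fun idx => if 32 - t ≤ idx then arr.getD idx 0 else pvC n (31 - idx))
            (List.range 32)
      rw [hxval, harr']
      have hi2 : (2:Int)^(t+1) * 2 = 2^(t+1+1) := by ring
      have hj2 : ((31 - t : Nat) : Int) = (32:Int) - ((t+1 : Nat) : Int) := by
        push_cast; omega
      rw [hj, hi2, hj2]
      rw [ih (t+1) n (arr.set (31 - t) (pvC n t)) (by omega) (by omega)
            (by simp [hlen]) hn hbound ?_]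
      · apply List.map_congr_left
        intro idx hidx
        simp only [List.mem_range] at hidx
        by_cases h1 : 32 - (t+1) ≤ idx
        · by_cases h2 : idx = 31 - t
          · subst h2
            rw [if_pos h1, if_neg (by omega)]
            rw [List.getD_eq_getElem _ _ (by simp [hlen]; omega), List.getElem_set,
                if_pos (by omega)]
            congr 1
            omega
          · rw [if_pos h1, if_pos (by omega)]
            rw [List.getD_eq_getElem _ _ (by simp [hlen]; omega), List.getElem_set,
                if_neg (by omega), List.getD_eq_getElem _ _ (by omega)]
        · rw [if_neg h1, if_neg (by omega)]
      · intro idx hidx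
        rw [List.getD_eq_getElem _ _ (by simp [hlen]; omega), List.getElem_set,
            if_neg (by omega)]
        have := hzero idx (by omega)
        rw [List.getD_eq_getElem _ _ (by omega)] at this
        exact this
    · rw [if_neg hge]
      have : (List.range 32).map
            (fun idx => if 32 - t ≤ idx then arr.getD idx 0 else pvC n (31 - idx))
          = (List.range 32).map (fun idx => arr.getD idx 0) := by
        apply List.map_congr_left
        intro idx hidx
        simp only [List.mem_range] at hidx
        by_cases h1 : 32 - t ≤ idx
        · rw [if_pos h1]
        · rw [if_neg h1]
          have hk : t ≤ 31 - idx := by omega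
          have hpow : (2:Int)^t ≤ 2^(31 - idx) := pow_le_pow_right₀ (by norm_num) hk
          rw [pvC_zero_of_lt hn (by omega), hzero idx (by omega)]
      rw [this, map_getD_range_eq arr hlen]

lemma pvFunA_spec (x : Int) (hx : x ≤ 2^31) :
    pvFunA x = (List.range 32).map (fun idx => pvC (x + 1) (31 - idx)) := by
  unfold pvFunA
  rcases le_or_gt (x + 1) 0 with h | h
  · rw [pvFunLoopA]
    have : ¬ (PySem.Int.floordiv 2 2 ≤ x + 1) := by
      rw [PySem.Int.floordiv_eq_ediv_of_pos (by norm_num)]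
      norm_num; omega
    rw [if_neg this]
    have hmap : (List.range 32).map (fun idx => pvC (x + 1) (31 - idx))
        = (List.range 32).map (fun _ => (0:Int)) := by
      apply List.map_congr_left
      intro idx _
      unfold pvC
      rw [if_pos h]
    rw [hmap]
    simp [List.map_const']
  · have h2 : ((2:Int)) = (2:Int)^(0+1) := by norm_num
    have h32 : ((32:Int)) = (32:Int) - ((0:Nat):Int) := by norm_num
    rw [h2, h32]
    rw [loopA_spec 33 0 (x+1) (List.replicate 32 0) (by omega) (by omega) (by simp) h
          (by have := pow_pos (show (0:Int) < 2 by norm_num) 31; omega)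
          (fun idx hidx => List.getD_replicate _ (by omega))]
    apply List.map_congr_left
    intro idx hidx
    simp only [List.mem_range] at hidx
    rw [if_neg (by omega)]

lemma subfold (f g : Nat → Int) : ∀ m : Nat, m ≤ 32 →
    (PySem.List.pyRange 0 (m:Int)).foldl
      (fun acc i => PySem.List.pySetD acc i
        (PySem.List.pyGetD acc i 0 - PySem.List.pyGetD ((List.range 32).map g) i 0))
      ((List.range 32).map f)
    = (List.range 32).map (fun idx => if idx < m then f idx - g idx else f idx) := by
  intro m
  induction m with
  | zero =>
    intro _
    rw [show ((0:Nat):Int) = 0 by norm_num, PySem.List.pyRange_one_eq_nil (by norm_num)]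
    simp
  | succ m ih =>
    intro hm
    rw [show (((m+1:Nat)):Int) = ((m:Nat):Int) + 1 by push_cast; ring,
        PySem.List.pyRange_one_succ_right (by positivity), List.foldl_append,
        ih (by omega)]
    simp only [List.foldl_cons, List.foldl_nil]
    set F := fun idx => if idx < m then f idx - g idx else f idx with hF
    have hget1 : PySem.List.pyGetD ((List.range 32).map F) ((m:Nat):Int) 0 = F m := by
      rw [PySem.List.pyGetD_natCast, PySem.List.getD_map_range _ _ _ _ (by omega)]
    have hget2 : PySem.List.pyGetD ((List.range 32).map g) ((m:Nat):Int) 0 = g m := by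
      rw [PySem.List.pyGetD_natCast, PySem.List.getD_map_range _ _ _ _ (by omega)]
    rw [hget1, hget2, PySem.List.pySetD_natCast,
        set_map_range F m (F m - g m) (by omega)]
    apply List.map_congr_left
    intro idx hidx
    simp only [List.mem_range] at hidx
    simp only [hF]
    by_cases h1 : idx = m
    · subst h1
      rw [if_pos rfl, if_neg (by omega), if_pos (by omega)]
    · rw [if_neg h1]
      by_cases h2 : idx < m
      · rw [if_pos h2, if_pos (by omega)]
      · rw [if_neg h2, if_neg (by omega)]

-- ===== B-side running-max characterisation =====

lemma foldl_max_init_le (F : Nat → Int) : ∀ (xs : List Nat) (init : Int),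
    init ≤ xs.foldl (fun b k => max b (F k)) init := by
  intro xs
  induction xs with
  | nil => intro init; simp
  | cons x t ih =>
    intro init
    simp only [List.foldl_cons]
    exact le_trans (le_max_left _ _) (ih _)

lemma le_foldl_max_of_mem (F : Nat → Int) : ∀ (xs : List Nat) (init : Int) (k : Nat),
    k ∈ xs → F k ≤ xs.foldl (fun b k => max b (F k)) init := by
  intro xs
  induction xs with
  | nil => intro _ _ h; simp at h
  | cons x t ih =>
    intro init k hk
    simp only [List.foldl_cons]
    rcases List.mem_cons.mp hk with h | h
    · subst h
      exact le_trans (le_max_right _ _) (foldl_max_init_le F t _)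
    · exact ih _ k h

lemma foldl_max_le (F : Nat → Int) : ∀ (xs : List Nat) (init c : Int),
    init ≤ c → (∀ k ∈ xs, F k ≤ c) → xs.foldl (fun b k => max b (F k)) init ≤ c := by
  intro xs
  induction xs with
  | nil => intro init c h _; simpa using h
  | cons x t ih =>
    intro init c h hall
    simp only [List.foldl_cons]
    exact ih _ c (max_le h (hall x List.mem_cons_self)) (fun k hk => hall k (List.mem_cons_of_mem _ hk))

-- ===== VERDICT (by name: the statement is the Claim_ definition above) =====
theorem min_deletions_for_nonzero_and_spec : Claim_equal_min_deletions_for_nonzero_and := by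
  intro l r hdom
  unfold Spec_min_deletions_for_nonzero_and
  have hl : -2147483648 ≤ l ∧ l ≤ 2147483648 := by
    simp only [Dom_min_deletions_for_nonzero_and, pvDomInt, Bool.and_eq_true,
      decide_eq_true_eq] at hdom
    exact hdom.1
  have hr : -2147483648 ≤ r ∧ r ≤ 2147483648 := by
    simp only [Dom_min_deletions_for_nonzero_and, pvDomInt, Bool.and_eq_true,
      decide_eq_true_eq] at hdom
    exact hdom.2
  unfold min_deletions_for_nonzero_and min_deletions_for_nonzero_and_alt
  have ha : pvFunA r = (List.range 32).map (fun idx => pvC (r + 1) (31 - idx)) :=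
    pvFunA_spec r (by simp only [show (2:Int)^31 = 2147483648 from by norm_num]; omega)
  have hb : pvFunA (l - 1) = (List.range 32).map (fun idx => pvC l (31 - idx)) := by
    have := pvFunA_spec (l - 1)
      (by simp only [show (2:Int)^31 = 2147483648 from by norm_num]; omega)
    rw [this]
    congr 1
    funext idx
    congr 1
    omega
  show r + 1 - l -
      ((PySem.List.max?
          ((PySem.List.pyRange 0 32).foldl
            (fun acc i => PySem.List.pySetD acc i
              (PySem.List.pyGetD acc i 0 - PySem.List.pyGetD (pvFunA (l - 1)) i 0))
            (pvFunA r))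
          (fun x => x)).getD 0)
    = r + 1 - l -
      ((PySem.List.pyRange 0 32).foldl
        (fun best k => max best (pvCnt (r + 1) k - pvCnt l k)) 0)
  rw [ha, hb]
  set g : Nat → Int := fun idx => pvC (r + 1) (31 - idx) - pvC l (31 - idx) with hg
  -- B's fold over pyRange 0 32, as a fold over List.range 32
  have hB : (PySem.List.pyRange 0 (32:Int)).foldl
        (fun best k => max best (pvCnt (r + 1) k - pvCnt l k)) 0
      = (List.range 32).foldl (fun b k => max b (g (31 - k))) 0 := by
    rw [show ((32:Int)) = ((32:Nat):Int) from by norm_num, PySem.List.pyRange_one,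
        show ((((32:Nat)):Int) - 0).toNat = 32 from by decide, List.foldl_map]
    apply PySem.List.foldl_congr_mem
    intro b k hk
    simp only [List.mem_range] at hk
    have h31 : 31 - (31 - k) = k := by omega
    have hgk : g (31 - k) = pvC (r + 1) k - pvC l k := by
      show pvC (r + 1) (31 - (31 - k)) - pvC l (31 - (31 - k)) = _
      rw [h31]
    rw [zero_add, pvCnt_eq k, pvCnt_eq k, hgk]
  rw [hB]
  rw [show ((32:Int)) = ((32:Nat):Int) by norm_num,
      subfold (fun idx => pvC (r + 1) (31 - idx)) (fun idx => pvC l (31 - idx)) 32 (by omega)]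
  have hlist : (List.range 32).map
      (fun idx => if idx < 32 then
          pvC (r + 1) (31 - idx) - pvC l (31 - idx) else pvC (r + 1) (31 - idx))
      = (List.range 32).map g := by
    apply List.map_congr_left
    intro idx hidx
    simp only [List.mem_range] at hidx
    rw [if_pos (by omega), hg]
  rw [hlist]
  congr 1
  -- both sides compute the maximum of the values g 0, …, g 31
  have hl31 : pvC l 31 = 0 := by
    by_cases hc : l ≤ 0
    · unfold pvC; rw [if_pos hc]
    · exact pvC_zero_of_lt (by omega) (by simp only [show (2:Int)^31 = 2147483648 from by norm_num]; omega)
  have hg0 : 0 ≤ g 0 := by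
    rw [hg]
    simp only [Nat.sub_zero, hl31, sub_zero]
    exact pvC_nonneg _ _
  rcases hmx : PySem.List.max? ((List.range 32).map g) (fun x => x) with _ | mx
  · exact absurd ((PySem.List.max?_eq_none_iff _ _).mp hmx) (by simp)
  have hmem := PySem.List.max?_mem hmx
  have hmax := PySem.List.max?_isMax hmx
  simp only [Option.getD_some]
  apply le_antisymm
  · -- mx ≤ fold
    rcases List.mem_map.mp hmem with ⟨idx, hidx, hval⟩
    simp only [List.mem_range] at hidx
    have : mx = g (31 - (31 - idx)) := by rw [show 31 - (31 - idx) = idx by omega, hval]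
    rw [this]
    exact le_foldl_max_of_mem (fun k => g (31 - k)) _ 0 (31 - idx) (by simp; omega)
  · -- fold ≤ mx
    apply foldl_max_le
    · exact le_trans hg0 (hmax (g 0) (List.mem_map.mpr ⟨0, by simp, rfl⟩))
    · intro k hk
      simp only [List.mem_range] at hk
      exact hmax (g (31 - k)) (List.mem_map.mpr ⟨31 - k, by simp; omega, rfl⟩)
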